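-- pv_equiv track=rewrite | github.com/guanchengc/nzoi | NZOI 2023/q2-second.py | loop
-- ===== SOURCE A (Python) =====
-- def loop(listOfCards, counter = 0):
--     if len(listOfCards) < 3:
--         return counter, listOfCards
--     a = len(listOfCards)
--     for i in range(a - 2):
--         if listOfCards[i] == listOfCards[i+1] and listOfCards[i+1] == listOfCards[i+2]:
--             listOfCards.pop(i)
--             listOfCards.pop(i)
--             listOfCards.pop(i)
--             counter += 1
--             return loop(listOfCards, counter)
--         if listOfCards[i] + 1 in listOfCards and listOfCards[i] + 2 in listOfCards:
--             n = listOfCards[i]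
--             listOfCards.remove(n)
--             listOfCards.remove(n + 1)
--             listOfCards.remove(n + 2)
--             counter += 1
--             return loop(listOfCards, counter)
--
--     return counter, listOfCards
-- ===== SOURCE B (Python) =====
-- def loop(listOfCards, counter=0):
--     # Non-mutating rewrite: outer while loop; each pass finds the first applicable
--     # action, then rebuilds the list (slice for a triple, one-pass rebuild for a run).
--     cards = list(listOfCards)
--     while len(cards) >= 3:
--         action = None
--         for i in range(len(cards) - 2):
--             if cards[i] == cards[i + 1] == cards[i + 2]:
--                 action = ('triple', i)
--                 break
--             if cards[i] + 1 in cards and cards[i] + 2 in cards: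
--                 action = ('run', cards[i])
--                 break
--         if action is None:
--             break
--         kind, v = action
--         if kind == 'triple':
--             cards = cards[:v] + cards[v + 3:]
--         else:
--             need = [v, v + 1, v + 2]
--             out = []
--             for c in cards:
--                 if c in need:
--                     need.remove(c)
--                 else:
--                     out.append(c)
--             cards = out
--         counter += 1
--     return counter, cards
-- ===== Notes on version B (the rewrite author's own statement) =====
-- stated objective: alternative
-- what changed: Replaces A's tail-recursive restart with an explicit while loop that first finds the applicable action and then rebuilds the list functionally (slice for a consecutive triple, one single-pass need/out rebuild for a run) instead of mutating in place with pop(i) three times and three list.remove calls; B does not mutate its argument.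
import Mathlib
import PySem

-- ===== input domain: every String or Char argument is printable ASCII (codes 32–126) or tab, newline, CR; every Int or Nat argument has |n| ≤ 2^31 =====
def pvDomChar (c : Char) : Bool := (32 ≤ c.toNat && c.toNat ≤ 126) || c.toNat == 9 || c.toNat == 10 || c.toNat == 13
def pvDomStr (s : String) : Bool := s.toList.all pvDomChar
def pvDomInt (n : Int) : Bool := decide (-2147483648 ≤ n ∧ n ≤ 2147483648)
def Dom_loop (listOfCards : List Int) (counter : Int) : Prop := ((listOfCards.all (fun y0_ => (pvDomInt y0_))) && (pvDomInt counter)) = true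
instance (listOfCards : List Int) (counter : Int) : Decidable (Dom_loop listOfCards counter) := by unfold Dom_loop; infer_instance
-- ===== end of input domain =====

-- B is an explicit worklist rewrite of A's tail recursion: each pass finds the first
-- applicable action and rebuilds the list functionally (slice / single-pass rebuild)
-- instead of mutating with pop/remove; A mutates its argument in place, B does not —
-- the equivalence proved here is about the RETURN value only.

-- ===== PORT A =====
-- listOfCards[i] (guarded read; every read in A is in range)
def getA (l : List Int) (i : Nat) : Int := (PySem.List.pyGet? l (i : Int)).getD 0
-- listOfCards.pop(i) (guard .getD l never fires on A's in-range pops)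
def popA (l : List Int) (i : Nat) : List Int := ((PySem.List.pop? l (i : Int)).map Prod.snd).getD l
-- the body of A's for-loop: returns the mutated list of the branch taken, or none
def scanA (l : List Int) : List Nat → Option (List Int)
  | [] => none
  | i :: rest =>
    if getA l i = getA l (i+1) ∧ getA l (i+1) = getA l (i+2) then
      some (popA (popA (popA l i) i) i)
    else if getA l i + 1 ∈ l ∧ getA l i + 2 ∈ l then
      some ((PySem.List.remove?
              ((PySem.List.remove?
                ((PySem.List.remove? l (getA l i)).getD l)
                (getA l i + 1)).getD ((PySem.List.remove? l (getA l i)).getD l))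
              (getA l i + 2)).getD
            ((PySem.List.remove?
                ((PySem.List.remove? l (getA l i)).getD l)
                (getA l i + 1)).getD ((PySem.List.remove? l (getA l i)).getD l)))
    else scanA l rest

-- A's tail recursion, with a fuel totality guard (len(listOfCards) is always enough:
-- every recursive call removes three elements and spends one fuel)
def loopFuelA (fuel : Nat) (l : List Int) (c : Int) : Int × List Int :=
  match fuel with
  | 0 => (c, l)
  | fuel + 1 =>
    if l.length < 3 then (c, l)
    else
      match scanA l (List.range (l.length - 2)) with
      | some l' => loopFuelA fuel l' (c + 1)
      | none => (c, l)

def loop (listOfCards : List Int) (counter : Int) : Int × List Int :=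
  loopFuelA listOfCards.length listOfCards counter

-- ===== PORT B =====
-- the action B's inner for-loop finds: ('triple', i) or ('run', v)
inductive BAction where
  | triple (i : Nat)
  | run (v : Int)

-- B's inner for-loop with break: first applicable action, if any
def scanB (l : List Int) : List Nat → Option BAction
  | [] => none
  | i :: rest =>
    if getA l i = getA l (i+1) ∧ getA l (i+1) = getA l (i+2) then
      some (.triple i)
    else if getA l i + 1 ∈ l ∧ getA l i + 2 ∈ l then
      some (.run (getA l i))
    else scanB l rest

-- applying the found action: cards[:i] + cards[i+3:], or the need/out rebuild pass
def applyB (l : List Int) : BAction → List Int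
  | .triple i => PySem.List.slice l none (some (i : Int)) ++ PySem.List.slice l (some ((i : Int) + 3)) none
  | .run v =>
    (l.foldl (fun (st : List Int × List Int) c =>
        if c ∈ st.1 then ((PySem.List.remove? st.1 c).getD st.1, st.2)
        else (st.1, st.2 ++ [c])) ([v, v + 1, v + 2], [])).2

-- B's 'while len(cards) >= 3' loop, with the same fuel totality guard
def loopFuelB (fuel : Nat) (cards : List Int) (counter : Int) : Int × List Int :=
  match fuel with
  | 0 => (counter, cards)
  | fuel + 1 =>
    if 3 ≤ cards.length then
      match scanB cards (List.range (cards.length - 2)) with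
      | some act => loopFuelB fuel (applyB cards act) (counter + 1)
      | none => (counter, cards)
    else (counter, cards)

def loop_alt (listOfCards : List Int) (counter : Int) : Int × List Int :=
  loopFuelB listOfCards.length listOfCards counter

-- ===== PRECONDITION & SPEC =====
def Spec_loop (listOfCards : List Int) (counter : Int) (out : Int × List Int) : Prop := out = loop_alt listOfCards counter
instance (listOfCards : List Int) (counter : Int) (out : Int × List Int) : Decidable (Spec_loop listOfCards counter out) := by unfold Spec_loop; infer_instance

-- ===== CLAIM (what is proved, stated in full; the proofs are below) =====
def Claim_equal_loop : Prop := ∀ (listOfCards : List Int) (counter : Int), Dom_loop listOfCards counter → Spec_loop listOfCards counter (loop listOfCards counter)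

-- ===== LEMMAS AND PROOFS =====

theorem popA_eq {l : List Int} {i : Nat} (h : i < l.length) :
    popA l i = l.eraseIdx i := by
  simp [popA, PySem.List.pop?_natCast l i h]

theorem popA_length {l : List Int} {i : Nat} (h : i < l.length) :
    (popA l i).length + 1 = l.length := by
  simp [popA, PySem.List.pop?_natCast l i h, List.length_eraseIdx, h]
  omega

-- proof-level characterisation of B's rebuild pass
def removeAll : List Int → List Int → List Int
  | [], _ => []
  | c :: cs, p => if c ∈ p then removeAll cs (p.erase c) else c :: removeAll cs p

theorem foldl_eq_removeAll (cs : List Int) : ∀ (need out : List Int),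
    (cs.foldl (fun (st : List Int × List Int) c =>
        if c ∈ st.1 then ((PySem.List.remove? st.1 c).getD st.1, st.2)
        else (st.1, st.2 ++ [c])) (need, out)).2 = out ++ removeAll cs need := by
  induction cs with
  | nil => intro need out; simp [removeAll]
  | cons c cs ih =>
    intro need out
    simp only [List.foldl_cons, removeAll]
    by_cases hc : c ∈ need
    · simp [hc, PySem.List.remove?_eq_some_erase _ _ hc, ih]
    · simp [hc, ih]

-- removing one value's first occurrence then the rest equals one combined pass
theorem removeAll_erase (a : Int) (l : List Int) : ∀ p, a ∉ p →
    removeAll (l.erase a) p = removeAll l (a :: p) := by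
  induction l with
  | nil => intro p _; simp [removeAll]
  | cons c cs ih =>
    intro p hap
    by_cases hca : c = a
    · subst hca
      simp [removeAll, List.erase_cons_head, (by simp : c ∈ c :: p)]
    · rw [List.erase_cons_tail (by simp [hca])]
      by_cases hcp : c ∈ p
      · have h1 : c ∈ a :: p := by simp [hcp]
        rw [removeAll, if_pos hcp, removeAll, if_pos h1,
          List.erase_cons_tail (by simp; exact fun h => hca h.symm)]
        exact ih _ (fun h => hap (List.mem_of_mem_erase h))
      · have h1 : c ∉ a :: p := by simp [hcp, hca]
        rw [removeAll, if_neg hcp, removeAll, if_neg h1, ih p hap]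

theorem removeAll_nil_pending (l : List Int) : removeAll l [] = l := by
  induction l with
  | nil => rfl
  | cons c cs ih => simp [removeAll, ih]

theorem removeAll_singleton (l : List Int) (v : Int) : removeAll l [v] = l.erase v := by
  have := removeAll_erase v l [] (by simp)
  rw [removeAll_nil_pending] at this
  exact this.symm

-- each step of A's scan equals B's scan followed by applying the action
theorem scanA_eq_scanB (l : List Int) (idxs : List Nat)
    (hin : ∀ i ∈ idxs, i + 2 < l.length) :
    scanA l idxs = (scanB l idxs).map (applyB l) := by
  induction idxs with
  | nil => simp [scanA, scanB]
  | cons i rest ih =>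
    have hi : i + 2 < l.length := hin i (by simp)
    rw [scanA, scanB]
    split_ifs with h1 h2
    · -- triple: three pops at i = take i ++ drop (i+3)
      simp only [Option.map_some]
      congr 1
      have key : ∀ (j : Nat) (xs : List Int), j + 2 < xs.length →
          popA (popA (popA xs j) j) j = xs.take j ++ xs.drop (j + 3) := by
        intro j
        induction j with
        | zero =>
          intro xs hx
          match xs, hx with
          | a :: b :: c :: rest, _ =>
            have e1 : popA (a :: b :: c :: rest) 0 = b :: c :: rest := by
              rw [popA_eq (by simp)]
              rfl
            rw [e1]
            have e2 : popA (b :: c :: rest) 0 = c :: rest := by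
              rw [popA_eq (by simp)]
              rfl
            rw [e2]
            have e3 : popA (c :: rest) 0 = rest := by
              rw [popA_eq (by simp)]
              rfl
            rw [e3]
            simp
        | succ j ihj =>
          intro xs hx
          match xs, hx with
          | a :: rest, hx =>
            have hr : j + 2 < rest.length := by simp at hx; omega
            have hp : ∀ (ys : List Int), j < ys.length →
                popA (a :: ys) (j+1) = a :: popA ys j := by
              intro ys hy
              have h1 : j + 1 < (a :: ys).length := by simp; omega
              rw [popA_eq (l := a :: ys) h1, popA_eq hy, List.eraseIdx_cons_succ]
            rw [hp rest (by omega)]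
            have e1 : (popA rest j).length + 1 = rest.length := popA_length (by omega)
            have e2 : (popA (popA rest j) j).length + 1 = (popA rest j).length :=
              popA_length (by omega)
            rw [hp (popA rest j) (by omega), hp (popA (popA rest j) j) (by omega)]
            rw [ihj rest hr]
            rw [List.take_succ_cons, show j + 1 + 3 = j + 3 + 1 by omega,
              List.drop_succ_cons]
            rfl
      rw [key i l hi]
      have hcast : ((i : Int) + 3) = ((i + 3 : Nat) : Int) := by push_cast; ring
      simp only [applyB]
      rw [PySem.List.slice_to_natCast, hcast, PySem.List.slice_from_natCast]
    · -- run: three first-occurrence removals = one rebuild pass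
      obtain ⟨hm1, hm2⟩ := h2
      have hg : getA l i = l[i]'(by omega) := by
        simp only [getA, PySem.List.pyGet?_natCast]
        rw [List.getElem?_eq_getElem (by omega)]
        rfl
      have hm0 : getA l i ∈ l := by rw [hg]; exact List.getElem_mem _
      simp only [Option.map_some]
      congr 1
      rw [PySem.List.remove?_eq_some_erase l _ hm0, Option.getD_some]
      have hm1' : getA l i + 1 ∈ l.erase (getA l i) :=
        (List.mem_erase_of_ne (by omega)).mpr hm1
      rw [PySem.List.remove?_eq_some_erase _ _ hm1', Option.getD_some]
      have hm2' : getA l i + 2 ∈ (l.erase (getA l i)).erase (getA l i + 1) :=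
        (List.mem_erase_of_ne (by omega)).mpr ((List.mem_erase_of_ne (by omega)).mpr hm2)
      rw [PySem.List.remove?_eq_some_erase _ _ hm2', Option.getD_some]
      simp only [applyB, foldl_eq_removeAll, List.nil_append]
      rw [← removeAll_erase _ _ _
            (by simp only [List.mem_cons, List.not_mem_nil, or_false]; omega),
          ← removeAll_erase _ _ _
            (by simp only [List.mem_cons, List.not_mem_nil, or_false]; omega),
          removeAll_singleton]
    · exact ih (fun j hj => hin j (by simp [hj]))

-- with the same fuel, the two loops agree step for step
theorem loopFuelA_eq_loopFuelB (fuel : Nat) : ∀ (l : List Int) (c : Int),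
    loopFuelA fuel l c = loopFuelB fuel l c := by
  induction fuel with
  | zero => intro l c; rfl
  | succ fuel ih =>
    intro l c
    rw [loopFuelA, loopFuelB]
    by_cases h : l.length < 3
    · rw [if_pos h, if_neg (by omega)]
    · rw [if_neg h, if_pos (by omega)]
      have hsc := scanA_eq_scanB l (List.range (l.length - 2))
        (fun i hi => by have := List.mem_range.mp hi; omega)
      cases hb : scanB l (List.range (l.length - 2)) with
      | none =>
        rw [hb, Option.map_none] at hsc
        simp only [hsc]
      | some act =>
        rw [hb, Option.map_some] at hsc
        simp only [hsc]
        exact ih (applyB l act) (c + 1)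

-- ===== VERDICT (by name: the statement is the Claim_ definition above) =====
theorem loop_spec : Claim_equal_loop := by
  intro l c _
  unfold Spec_loop loop_alt loop
  exact loopFuelA_eq_loopFuelB l.length l c
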